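-- pv_equiv track=rewrite | github.com/shincheolhwan/algorithm | 프로그래머스/3/214288. 상담원 인원/상담원 인원.py | get_wait_time
-- ===== SOURCE A (Python) =====
-- from queue import PriorityQueue, Queue
--
-- def get_wait_time(max_mento, reqs):
--     result = [-1] * (max_mento + 1)
--
--     for i in range(1, max_mento + 1):
--         pq = PriorityQueue()
--         wait_time = 0
--         for req in reqs:
--             if pq.qsize() < i:
--                 pq.put(req[0] + req[1])
--             else:
--                 finish_time = pq.get()
--                 if finish_time > req[0]:
--                     wait_time += finish_time - req[0]
--                     pq.put(finish_time + req[1])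
--                 else:
--                     pq.put(req[0] + req[1])
--         else:
--             result[i] = wait_time
--
--     return result
-- ===== SOURCE B (Python) =====
-- def _simulate(i, reqs):
--     busy = []
--     wait_time = 0
--     for req in reqs:
--         if len(busy) < i:
--             busy.append(req[0] + req[1])
--         else:
--             finish_time = min(busy)
--             busy.remove(finish_time)
--             if finish_time > req[0]:
--                 wait_time += finish_time - req[0]
--                 busy.append(finish_time + req[1])
--             else:
--                 busy.append(req[0] + req[1])
--     return wait_time
--
-- def get_wait_time(max_mento, reqs):
--     return [(-1 if i == 0 else _simulate(i, reqs)) for i in range(max_mento + 1)]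
-- ===== Notes on version B (the rewrite author's own statement) =====
-- stated objective: alternative
-- what changed: Replaced the PriorityQueue heap with a plain list of finish times using an explicit min-scan plus remove-by-value, and build the result directly as one comprehension over mentor counts instead of index assignments into a preallocated list.
import Mathlib
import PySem

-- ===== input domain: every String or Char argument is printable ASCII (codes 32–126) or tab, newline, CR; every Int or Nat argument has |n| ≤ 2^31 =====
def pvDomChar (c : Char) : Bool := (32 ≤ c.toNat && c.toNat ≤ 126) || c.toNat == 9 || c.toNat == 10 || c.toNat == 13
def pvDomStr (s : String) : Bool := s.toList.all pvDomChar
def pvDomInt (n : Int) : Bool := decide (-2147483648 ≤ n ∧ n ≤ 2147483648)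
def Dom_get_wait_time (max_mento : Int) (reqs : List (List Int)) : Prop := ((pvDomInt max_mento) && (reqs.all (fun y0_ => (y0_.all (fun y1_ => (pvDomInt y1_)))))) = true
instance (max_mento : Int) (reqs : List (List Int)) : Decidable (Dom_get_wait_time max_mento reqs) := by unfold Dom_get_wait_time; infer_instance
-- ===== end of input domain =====

-- B replaces A's PriorityQueue with a plain list scanned for its minimum and builds the
-- result by prepending -1 to a per-mentor-count list instead of index assignments (alternative, not faster).


-- ===== PORT A =====
-- the PriorityQueue is modelled as a ≤-sorted list: put = ordered insert, get = take the head (the minimum)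
def pvAStep (i : Int) (st : List Int × Int) (req : List Int) : List Int × Int :=
  match req with
  | a :: b :: _ =>
    if (st.1.length : Int) < i then
      (List.orderedInsert (· ≤ ·) (a + b) st.1, st.2)
    else
      match st.1 with
      | [] => st        -- unreachable: here st.1.length ≥ i ≥ 1
      | f :: rest =>
        if f > a then (List.orderedInsert (· ≤ ·) (f + b) rest, st.2 + (f - a))
        else (List.orderedInsert (· ≤ ·) (a + b) rest, st.2)
  | _ => st             -- req[0]/req[1] would raise IndexError: excluded by Pre_

def get_wait_time (max_mento : Int) (reqs : List (List Int)) : List Int :=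
  let result := List.replicate (max_mento + 1).toNat (-1)
  (PySem.List.pyRange 1 (max_mento + 1) 1).foldl
    (fun res i => res.set i.toNat ((reqs.foldl (pvAStep i) ([], 0)).2)) result
    -- result[i] = wait_time; i ≥ 1 and i < len(result), so .set at i.toNat is exact

-- ===== PORT B =====
def pvBStep (i : Int) (st : List Int × Int) (req : List Int) : List Int × Int :=
  match req with
  | a :: b :: _ =>
    if (st.1.length : Int) < i then
      (st.1 ++ [a + b], st.2)
    else
      match PySem.List.min? st.1 (fun x => x) with
      | none => st      -- unreachable: here st.1 is nonempty
      | some f =>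
        let busy := (PySem.List.remove? st.1 f).getD st.1
        if f > a then (busy ++ [f + b], st.2 + (f - a))
        else (busy ++ [a + b], st.2)
  | _ => st             -- req[0]/req[1] would raise IndexError: excluded by Pre_

def pvSimulate_alt (i : Int) (reqs : List (List Int)) : Int :=
  (reqs.foldl (pvBStep i) ([], 0)).2

def get_wait_time_alt (max_mento : Int) (reqs : List (List Int)) : List Int :=
  (PySem.List.pyRange 0 (max_mento + 1) 1).map
    (fun i => if i = 0 then (-1) else pvSimulate_alt i reqs)

-- ===== PRECONDITION & SPEC =====
-- Pre_ excludes exactly the inputs on which A raises: whenever reqs is actually read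
-- (max_mento ≥ 1), every request needs length ≥ 2, else A raises IndexError on req[0]/req[1].
def Pre_get_wait_time (max_mento : Int) (reqs : List (List Int)) : Prop :=
  1 ≤ max_mento → ∀ r ∈ reqs, 2 ≤ r.length
instance (max_mento : Int) (reqs : List (List Int)) : Decidable (Pre_get_wait_time max_mento reqs) := by
  unfold Pre_get_wait_time; infer_instance

def pvWitness_get_wait_time : Int × List (List Int) := (2, [[0, 2], [1, 3], [1, 1]])

def Spec_get_wait_time (max_mento : Int) (reqs : List (List Int)) (out : List Int) : Prop := out = get_wait_time_alt max_mento reqs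
instance (max_mento : Int) (reqs : List (List Int)) (out : List Int) : Decidable (Spec_get_wait_time max_mento reqs out) := by unfold Spec_get_wait_time; infer_instance

-- ===== CLAIM (what is proved, stated in full; the proofs are below) =====
def Claim_equal_get_wait_time : Prop := ∀ (max_mento : Int) (reqs : List (List Int)), Dom_get_wait_time max_mento reqs → Pre_get_wait_time max_mento reqs → Spec_get_wait_time max_mento reqs (get_wait_time max_mento reqs)

-- ===== LEMMAS AND PROOFS =====

-- invariant tying A's sorted queue to B's unsorted busy list
def pvInv (s t : List Int × Int) : Prop :=
  s.1.Sorted (· ≤ ·) ∧ s.1.Perm t.1 ∧ s.2 = t.2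

theorem pvMin?_of_perm_sorted {f : Int} {rest l : List Int}
    (hp : (f :: rest).Perm l) (hs : (f :: rest).Sorted (· ≤ ·)) :
    PySem.List.min? l (fun x => x) = some f := by
  cases hmin : PySem.List.min? l (fun x => x) with
  | none =>
      have : l = [] := (PySem.List.min?_eq_none_iff _ _).mp hmin
      subst this
      exact absurd hp.length_eq (by simp)
  | some m =>
      have hm : m ∈ l := PySem.List.min?_mem hmin
      have hmin' := PySem.List.min?_isMin hmin
      have hf : f ∈ l := hp.mem_iff.mp (by simp)
      have h1 : m ≤ f := hmin' f hf
      have h2 : f ≤ m := by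
        have hm' : m ∈ f :: rest := hp.mem_iff.mpr hm
        rcases List.mem_cons.mp hm' with h | h
        · omega
        · exact List.rel_of_pairwise_cons hs h
      have : m = f := le_antisymm h1 h2
      simp [this]

theorem pvStep_inv (i : Int) (req : List Int) (s t : List Int × Int)
    (h : pvInv s t) : pvInv (pvAStep i s req) (pvBStep i t req) := by
  obtain ⟨hs, hp, hw⟩ := h
  match req with
  | [] => simpa [pvAStep, pvBStep] using ⟨hs, hp, hw⟩
  | [a] => simpa [pvAStep, pvBStep] using ⟨hs, hp, hw⟩
  | a :: b :: rs =>
    have hlen : t.1.length = s.1.length := hp.length_eq.symm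
    by_cases hlt : (s.1.length : Int) < i
    · have hltB : ((t.1.length : Int) < i) := by rw [hlen]; exact hlt
      simp only [pvAStep, pvBStep]
      rw [if_pos hlt, if_pos hltB]
      refine ⟨List.Pairwise.orderedInsert _ _ hs, ?_, hw⟩
      exact (List.perm_orderedInsert _ _ _).trans
        ((hp.cons (a + b)).trans (List.perm_append_singleton _ _).symm)
    · have hltB : ¬ ((t.1.length : Int) < i) := by rw [hlen]; exact hlt
      match hpq : s.1 with
      | [] =>
          have ht : t.1 = [] := List.eq_nil_of_length_eq_zero (by simp [hlen, hpq])
          have hmin : PySem.List.min? t.1 (fun x : Int => x) = none :=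
            (PySem.List.min?_eq_none_iff _ _).mpr ht
          have hmin0 : PySem.List.min? ([] : List Int) (fun x : Int => x) = none :=
            (PySem.List.min?_eq_none_iff _ _).mpr rfl
          simp only [pvAStep, pvBStep]
          rw [if_neg hlt, if_neg hltB]
          simp only [hpq, ht, hmin0]
          exact ⟨hs, hp, hw⟩
      | f :: rest =>
          rw [hpq] at hs hp
          have hmin : PySem.List.min? t.1 (fun x : Int => x) = some f := pvMin?_of_perm_sorted hp hs
          have hfmem : f ∈ t.1 := hp.mem_iff.mp (by simp)
          have hrem : PySem.List.remove? t.1 f = some (t.1.erase f) :=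
            PySem.List.remove?_eq_some_erase t.1 f hfmem
          have hperase : rest.Perm (t.1.erase f) := by
            have := (hp.erase f)
            rwa [List.erase_cons_head] at this
          have hsrest : rest.Sorted (· ≤ ·) := (List.sorted_cons.mp hs).2
          have hperm : ∀ x : Int, (List.orderedInsert (· ≤ ·) x rest).Perm (t.1.erase f ++ [x]) :=
            fun x => (List.perm_orderedInsert _ _ _).trans
              ((hperase.cons x).trans (List.perm_append_singleton _ _).symm)
          simp only [pvAStep, pvBStep]
          rw [if_neg hlt, if_neg hltB]
          simp only [hpq, hmin, hrem, Option.getD_some]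
          by_cases hfa : f > a
          · rw [if_pos hfa, if_pos hfa]
            exact ⟨List.Pairwise.orderedInsert _ _ hsrest, hperm _, by simp [hw]⟩
          · rw [if_neg hfa, if_neg hfa]
            exact ⟨List.Pairwise.orderedInsert _ _ hsrest, hperm _, hw⟩

theorem pvFold_inv (i : Int) (reqs : List (List Int)) :
    ∀ (s t : List Int × Int), pvInv s t →
      pvInv (reqs.foldl (pvAStep i) s) (reqs.foldl (pvBStep i) t) := by
  induction reqs with
  | nil => intro s t h; simpa using h
  | cons r rs ih =>
      intro s t h
      exact ih _ _ (pvStep_inv i r s t h)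

theorem pvSim_eq (i : Int) (reqs : List (List Int)) :
    (reqs.foldl (pvAStep i) ([], 0)).2 = pvSimulate_alt i reqs := by
  have h := pvFold_inv i reqs ([], 0) ([], 0) ⟨List.Pairwise.nil, List.Perm.refl _, rfl⟩
  exact h.2.2

theorem pvFoldl_set_length (g : Int → Int) (l : List Int) :
    ∀ acc : List Int,
      (l.foldl (fun res i => res.set i.toNat (g i)) acc).length = acc.length := by
  induction l with
  | nil => intro acc; rfl
  | cons i l ih => intro acc; simp [List.foldl_cons, ih]

theorem pvFoldl_set_getElem? (g : Int → Int) (l : List Int) (hpos : ∀ i ∈ l, 1 ≤ i) :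
    ∀ (acc : List Int) (k : Nat), k < acc.length →
      (l.foldl (fun res i => res.set i.toNat (g i)) acc)[k]?
        = if (k : Int) ∈ l then some (g k) else acc[k]? := by
  induction l with
  | nil => intro acc k hk; simp
  | cons i l ih =>
      intro acc k hk
      have hi : 1 ≤ i := hpos i (by simp)
      have hpos' : ∀ j ∈ l, 1 ≤ j := fun j hj => hpos j (by simp [hj])
      rw [List.foldl_cons, ih hpos' _ k (by simpa using hk)]
      by_cases hmem : (k : Int) ∈ l
      · simp [hmem]
      · rw [if_neg hmem]
        by_cases heq : (k : Int) = i
        · have hkn : i.toNat = k := by omega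
          rw [if_pos (by simp [heq]), List.getElem?_set, if_pos hkn]
          have hgi : g i = g k := by rw [← heq]
          simp only [hgi, if_pos (show i.toNat < acc.length by omega)]
        · have hne : i.toNat ≠ k := by omega
          rw [if_neg (by simp [List.mem_cons, heq, hmem]), List.getElem?_set, if_neg hne]

theorem pvOuter (g : Int → Int) (n : Nat) :
    (PySem.List.pyRange 1 ((n : Int) + 1) 1).foldl
        (fun res i => res.set i.toNat (g i)) (List.replicate (n + 1) (-1))
      = (-1) :: (PySem.List.pyRange 1 ((n : Int) + 1) 1).map g := by
  have hpos : ∀ i ∈ PySem.List.pyRange 1 ((n : Int) + 1) 1, 1 ≤ i := by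
    intro i hi
    exact ((PySem.List.mem_pyRange_one).mp hi).1
  have hlenr : (PySem.List.pyRange 1 ((n : Int) + 1) 1).length = n := by
    rw [PySem.List.length_pyRange_one]; omega
  have hlenL : ((PySem.List.pyRange 1 ((n : Int) + 1) 1).foldl
      (fun res i => res.set i.toNat (g i)) (List.replicate (n + 1) (-1))).length = n + 1 := by
    rw [pvFoldl_set_length]; simp
  apply List.ext_getElem?
  intro k
  by_cases hk : k < n + 1
  · rw [pvFoldl_set_getElem? g _ hpos _ k (by simpa using hk)]
    match k with
    | 0 =>
        have h0 : ((0 : Nat) : Int) ∉ PySem.List.pyRange 1 ((n : Int) + 1) 1 := by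
          simp [PySem.List.mem_pyRange_one]
        simp [h0]
    | k + 1 =>
        have hmem : ((k + 1 : Nat) : Int) ∈ PySem.List.pyRange 1 ((n : Int) + 1) 1 := by
          rw [PySem.List.mem_pyRange_one]; omega
        have hklt : k < (PySem.List.pyRange 1 ((n : Int) + 1) 1).length := by omega
        rw [if_pos hmem]
        rw [List.getElem?_cons_succ, List.getElem?_map, List.getElem?_eq_getElem hklt,
          PySem.List.getElem_pyRange_one]
        simp only [Option.map_some]
        have harg : ((k + 1 : Nat) : Int) = 1 + (k : Int) := by push_cast; ring
        rw [harg]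
  · have h1 : ((PySem.List.pyRange 1 ((n : Int) + 1) 1).foldl
        (fun res i => res.set i.toNat (g i)) (List.replicate (n + 1) (-1)))[k]? = none :=
      List.getElem?_eq_none (by rw [hlenL]; omega)
    have h2 : ((-1 : Int) :: (PySem.List.pyRange 1 ((n : Int) + 1) 1).map g)[k]? = none :=
      List.getElem?_eq_none (by simp [hlenr]; omega)
    rw [h1, h2]

-- ===== VERDICT (by name: the statement is the Claim_ definition above) =====
theorem get_wait_time_spec : Claim_equal_get_wait_time := by
  intro mm reqs hdom hpre
  unfold Spec_get_wait_time get_wait_time get_wait_time_alt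
  by_cases hneg : 0 ≤ mm
  · obtain ⟨n, rfl⟩ := Int.eq_ofNat_of_zero_le hneg
    rw [PySem.List.pyRange_one_cons (by omega : (0 : Int) < (n : Int) + 1), List.map_cons,
      if_pos rfl]
    have h1 : ((n : Int) + 1).toNat = n + 1 := by omega
    rw [h1, pvOuter (fun i => (reqs.foldl (pvAStep i) ([], 0)).2) n]
    have h2 : (0 : Int) + 1 = 1 := by ring
    rw [h2]
    congr 1
    apply List.map_congr_left
    intro i hi
    have h3 : 1 ≤ i := ((PySem.List.mem_pyRange_one).mp hi).1
    rw [if_neg (by omega), pvSim_eq]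
  · have h0 : (mm + 1).toNat = 0 := by omega
    rw [PySem.List.pyRange_one_eq_nil (by omega : mm + 1 ≤ 1),
      PySem.List.pyRange_one_eq_nil (by omega : mm + 1 ≤ 0), h0]
    rfl
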